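-- pv_equiv track=rewrite | github.com/mireklzicar/cellarc | scripts/solver_analysis.py | centered_window
-- ===== SOURCE A (Python) =====
-- from typing import Dict, Iterable, List, Optional, Sequence, Tuple
--
-- def centered_window(seq: Sequence[int], idx: int, W: int, wrap: bool) -> Tuple[int, ...]:
--     half = W // 2
--     n = len(seq)
--     if wrap:
--         return tuple(seq[(idx - half + j) % n] for j in range(W))
--     window = []
--     for j in range(idx - half, idx + half + 1):
--         if 0 <= j < n:
--             window.append(seq[j])
--         else:
--             window.append(0)
--     return tuple(window)
-- ===== SOURCE B (Python) =====
-- def centered_window(seq, idx, W, wrap):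
--     half = W // 2
--     n = len(seq)
--     if wrap:
--         if W <= 0:
--             return ()
--         s = (idx - half) % n
--         ext = tuple(seq[s:]) + tuple(seq[:s])
--         reps = -(-W // n)  # ceil(W / n)
--         return (ext * reps)[:W]
--     L = 2 * half + 1
--     if L <= 0:
--         return ()
--     start = idx - half
--     left = min(L, max(0, -start))
--     mid = tuple(seq[max(0, start):max(0, min(n, start + L))])
--     return (0,) * left + mid + (0,) * (L - left - len(mid))
-- ===== Notes on version B (the rewrite author's own statement) =====
-- stated objective: simpler
-- what changed: Replaces the per-index bounds-checked append loop with a clamped slice plus computed zero padding, and the per-index modular comprehension with a rotate-and-tile of the sequence.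
import Mathlib
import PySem

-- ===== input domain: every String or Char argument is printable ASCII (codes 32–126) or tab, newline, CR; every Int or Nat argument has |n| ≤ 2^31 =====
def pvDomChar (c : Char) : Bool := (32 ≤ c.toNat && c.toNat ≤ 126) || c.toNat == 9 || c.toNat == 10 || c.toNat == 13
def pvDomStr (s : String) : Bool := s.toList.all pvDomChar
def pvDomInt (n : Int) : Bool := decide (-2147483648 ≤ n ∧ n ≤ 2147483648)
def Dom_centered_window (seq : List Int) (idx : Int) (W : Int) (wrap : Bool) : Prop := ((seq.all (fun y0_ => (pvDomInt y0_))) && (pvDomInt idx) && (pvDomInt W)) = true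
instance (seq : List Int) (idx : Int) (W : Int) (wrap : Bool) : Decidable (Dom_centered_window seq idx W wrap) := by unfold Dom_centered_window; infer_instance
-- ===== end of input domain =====

-- B replaces A's per-index loops with a clamped slice plus computed zero padding (non-wrap)
-- and a rotate-and-tile of the sequence (wrap): same values, a different decomposition.


-- ===== PORT A =====
def centered_window (seq : List Int) (idx : Int) (W : Int) (wrap : Bool) : List Int :=
  let half := PySem.Int.floordiv W 2
  let n : Int := seq.length
  if wrap then
    (PySem.List.pyRange 0 W 1).map
      (fun j => PySem.List.pyGetD seq (PySem.Int.mod (idx - half + j) n) 0)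
  else
    (PySem.List.pyRange (idx - half) (idx + half + 1) 1).foldl
      (fun acc j => acc ++ [if 0 ≤ j ∧ j < n then PySem.List.pyGetD seq j 0 else 0]) []

-- ===== PORT B =====
def centered_window_alt (seq : List Int) (idx : Int) (W : Int) (wrap : Bool) : List Int :=
  let half := PySem.Int.floordiv W 2
  let n : Int := seq.length
  if wrap then
    if W ≤ 0 then []
    else
      let s := PySem.Int.mod (idx - half) n
      let ext := PySem.List.slice seq (some s) none ++ PySem.List.slice seq none (some s)
      let reps := -(PySem.Int.floordiv (-W) n)
      ((List.replicate reps.toNat ext).flatten).take W.toNat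
  else
    let L := 2 * half + 1
    if L ≤ 0 then []
    else
      let start := idx - half
      let left := min L (max 0 (-start))
      let mid := PySem.List.slice seq (some (max 0 start)) (some (max 0 (min n (start + L))))
      List.replicate left.toNat 0 ++ mid ++ List.replicate (L - left - (mid.length : Int)).toNat 0

-- ===== PRECONDITION & SPEC =====
-- Pre_ excludes only wrap = true with an empty seq and 0 < W, where Python A (and B) raise ZeroDivisionError.
def Pre_centered_window (seq : List Int) (idx : Int) (W : Int) (wrap : Bool) : Prop :=
  wrap = true → seq = [] → W ≤ 0
instance (seq : List Int) (idx : Int) (W : Int) (wrap : Bool) : Decidable (Pre_centered_window seq idx W wrap) := by unfold Pre_centered_window; infer_instance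
def pvWitness_centered_window : List Int × Int × Int × Bool := ([3, -1, 4, 1, 5], 2, 4, true)

def Spec_centered_window (seq : List Int) (idx : Int) (W : Int) (wrap : Bool) (out : List Int) : Prop := out = centered_window_alt seq idx W wrap
instance (seq : List Int) (idx : Int) (W : Int) (wrap : Bool) (out : List Int) : Decidable (Spec_centered_window seq idx W wrap out) := by unfold Spec_centered_window; infer_instance

-- ===== CLAIM (what is proved, stated in full; the proofs are below) =====
def Claim_equal_centered_window : Prop := ∀ (seq : List Int) (idx : Int) (W : Int) (wrap : Bool), Dom_centered_window seq idx W wrap → Pre_centered_window seq idx W wrap → Spec_centered_window seq idx W wrap (centered_window seq idx W wrap)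

-- ===== LEMMAS AND PROOFS =====

lemma flat_rep_getElem? {α : Type} (ext : List α) (r k : Nat) (hk : k < r * ext.length) :
    (List.replicate r ext).flatten[k]? = ext[k % ext.length]? := by
  induction r generalizing k with
  | zero => simp at hk
  | succ r ih =>
    have hn : 0 < ext.length := by
      rcases Nat.eq_zero_or_pos ext.length with h | h
      · rw [h, Nat.mul_zero] at hk; omega
      · exact h
    have hk2 : k < ext.length + r * ext.length := by rw [Nat.succ_mul] at hk; omega
    rw [List.replicate_succ, List.flatten_cons]
    by_cases h : k < ext.length
    · rw [List.getElem?_append_left h, Nat.mod_eq_of_lt h]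
    · rw [List.getElem?_append_right (by omega), ih _ (by omega)]
      conv_rhs => rw [Nat.mod_eq_sub_mod (by omega)]

lemma wrap_case (seq : List Int) (c : Int) (W : Int) (hne : seq ≠ []) :
    (PySem.List.pyRange 0 W 1).map
      (fun j => PySem.List.pyGetD seq (PySem.Int.mod (c + j) (seq.length : Int)) 0)
    = (if W ≤ 0 then []
       else ((List.replicate (-(PySem.Int.floordiv (-W) (seq.length : Int))).toNat
          (PySem.List.slice seq (some (PySem.Int.mod c (seq.length : Int))) none ++
           PySem.List.slice seq none (some (PySem.Int.mod c (seq.length : Int))))).flatten).take W.toNat) := by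
  have hn : 0 < (seq.length : Int) := by
    have := List.length_pos_iff.mpr hne; omega
  set n : Int := (seq.length : Int) with hndef
  by_cases hW : W ≤ 0
  · rw [if_pos hW, PySem.List.pyRange_one_eq_nil (by omega), List.map_nil]
  · rw [if_neg hW]
    set s := PySem.Int.mod c n with hs
    have hs0 : 0 ≤ s := PySem.Int.mod_nonneg c hn
    have hsn : s < n := PySem.Int.mod_lt c hn
    have hsemod : s = c % n := PySem.Int.mod_eq_emod_of_pos hn
    have hsnat : s.toNat < seq.length := by omega
    rw [PySem.List.slice_from seq hs0, PySem.List.slice_to seq hs0]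
    set ext := seq.drop s.toNat ++ seq.take s.toNat with hext
    have hextlen : ext.length = seq.length := by
      simp [hext]; omega
    set reps := -(PySem.Int.floordiv (-W) n) with hreps
    have hrb : (reps - 1) * n < W ∧ W ≤ reps * n :=
      (PySem.Int.neg_floordiv_neg_eq_iff_of_pos hn).mp rfl
    have hreps0 : 0 < reps := by nlinarith [hrb.2]
    have hWle : W.toNat ≤ reps.toNat * seq.length := by
      have hcast : (reps.toNat : Int) * (seq.length : Int) = reps * n := by
        rw [hndef]; congr 1; omega
      have : (W.toNat : Int) ≤ (reps.toNat : Int) * (seq.length : Int) := by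
        rw [hcast]; omega
      exact_mod_cast this
    apply List.ext_getElem?
    intro k
    by_cases hk : k < W.toNat
    · have hkr : k < reps.toNat * ext.length := by rw [hextlen]; omega
      rw [List.getElem?_take, if_pos hk, flat_rep_getElem? ext _ k hkr]
      have hm : k % ext.length < seq.length := by
        have := Nat.mod_lt k (y := ext.length) (by omega); omega
      rw [List.getElem?_map, PySem.List.getElem?_pyRange_one,
        if_pos (show k < (W - 0).toNat by omega)]
      simp only [Option.map_some]
      have hmod : PySem.Int.mod (c + (0 + (k : Int))) n = (c + (k : Int)) % n := by
        rw [PySem.Int.mod_eq_emod_of_pos hn]; ring_nf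
      rw [hmod, PySem.List.pyGetD_eq_getElem seq 0 (Int.emod_nonneg _ (by omega))
        (by rw [hndef] at *; exact Int.emod_lt_of_pos _ hn)]
      have h2 : (k : Int) % n = ((k % seq.length : Nat) : Int) := by
        rw [hndef, Int.natCast_mod]
      have h3 : (c + (k : Int)) % n = (s + ((k % seq.length : Nat) : Int)) % n := by
        rw [Int.add_emod, ← hsemod, h2]
      rw [List.getElem?_append, hextlen]
      simp only [List.length_drop]
      by_cases hcase : k % seq.length < seq.length - s.toNat
      · rw [if_pos hcase, List.getElem?_drop,
          List.getElem?_eq_getElem (by omega), Option.some_inj]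
        have heq : (c + (k : Int)) % n = s + ((k % seq.length : Nat) : Int) := by
          rw [h3]; exact Int.emod_eq_of_lt (by omega) (by omega)
        exact getElem_congr rfl (by omega) (by omega)
      · rw [Nat.not_lt] at hcase
        have hlt : k % seq.length < seq.length := Nat.mod_lt _ (by omega)
        rw [if_neg (by omega), List.getElem?_take, if_pos (by omega),
          List.getElem?_eq_getElem (by omega), Option.some_inj]
        have heq : (c + (k : Int)) % n = s + ((k % seq.length : Nat) : Int) - n := by
          rw [h3]
          have hshift : (s + ((k % seq.length : Nat) : Int)) % n
              = (s + ((k % seq.length : Nat) : Int) - n) % n := by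
            conv_lhs => rw [show s + ((k % seq.length : Nat) : Int)
                = (s + ((k % seq.length : Nat) : Int) - n) + n * 1 by ring]
            rw [Int.add_mul_emod_self_left]
          rw [hshift]
          exact Int.emod_eq_of_lt (by omega) (by omega)
        exact getElem_congr rfl (by omega) (by omega)
    · rw [List.getElem?_take, if_neg hk,
        List.getElem?_eq_none (by simp [PySem.List.length_pyRange_one]; omega)]

lemma nonwrap_case (seq : List Int) (c : Int) (L : Int) (hL : 0 < L) :
    (PySem.List.pyRange c (c + L) 1).map
      (fun j => if 0 ≤ j ∧ j < (seq.length : Int) then PySem.List.pyGetD seq j 0 else 0)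
    = List.replicate (min L (max 0 (-c))).toNat 0 ++
      PySem.List.slice seq (some (max 0 c)) (some (max 0 (min (seq.length : Int) (c + L)))) ++
      List.replicate (L - min L (max 0 (-c)) -
        ((PySem.List.slice seq (some (max 0 c)) (some (max 0 (min (seq.length : Int) (c + L))))).length : Int)).toNat 0 := by
  set n : Int := (seq.length : Int) with hndef
  have hn0 : 0 ≤ n := by positivity
  set left := min L (max 0 (-c)) with hleft
  set lo := max 0 c with hlo
  set hi := max 0 (min n (c + L)) with hhi
  have hslice : PySem.List.slice seq (some lo) (some hi) = (seq.drop lo.toNat).take (hi.toNat - lo.toNat) :=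
    PySem.List.slice_toNat seq (by omega) (by omega)
  have hmidlen : ((PySem.List.slice seq (some lo) (some hi)).length : Int) = hi - min lo hi := by
    rw [hslice]; simp; omega
  set midlen := hi - min lo hi with hmld
  rw [hmidlen]
  have hml0 : 0 ≤ midlen := by omega
  rw [PySem.List.pyRange_one_append c (c + left) (c + L) (by omega) (by omega),
    PySem.List.pyRange_one_append (c + left) (c + left + midlen) (c + L) (by omega) (by omega),
    List.map_append, List.map_append, List.append_assoc]
  congr 1
  · -- left pad: every j in [c, c+left) is negative
    have hfun : ∀ j ∈ PySem.List.pyRange c (c + left) 1,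
        (if 0 ≤ j ∧ j < n then PySem.List.pyGetD seq j 0 else 0) = 0 := by
      intro j hj; rw [PySem.List.mem_pyRange_one] at hj; rw [if_neg (by omega)]
    rw [List.map_congr_left hfun, List.map_const', PySem.List.length_pyRange_one]
    congr 1; omega
  congr 1
  · -- middle: in-range indices give the clamped slice
    by_cases hmid : midlen = 0
    · rw [hmid]
      rw [show c + left + 0 = c + left by ring,
        PySem.List.pyRange_one_eq_nil (by omega), List.map_nil, hslice]
      have h0 : hi.toNat - lo.toNat = 0 := by omega
      simp [h0]
    · have hml : c + left = lo := by omega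
      have hfun : ∀ j ∈ PySem.List.pyRange (c + left) (c + left + midlen) 1,
          (if 0 ≤ j ∧ j < n then PySem.List.pyGetD seq j 0 else 0) = PySem.List.pyGetD seq j 0 := by
        intro j hj; rw [PySem.List.mem_pyRange_one] at hj; rw [if_pos (by omega)]
      rw [List.map_congr_left hfun, hslice]
      apply List.ext_getElem?
      intro k
      by_cases hk : k < midlen.toNat
      · rw [List.getElem?_map, PySem.List.getElem?_pyRange_one, if_pos (by omega)]
        simp only [Option.map_some]
        rw [PySem.List.pyGetD_eq_getElem seq 0 (by omega) (by omega)]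
        rw [List.getElem?_take, if_pos (by omega), List.getElem?_drop,
          List.getElem?_eq_getElem (by omega), Option.some_inj]
        exact getElem_congr rfl (by omega) (by omega)
      · rw [List.getElem?_eq_none (by simp [PySem.List.length_pyRange_one]; omega),
          List.getElem?_eq_none (by simp; omega)]
  · -- right pad: every j in [c+left+midlen, c+L) is at least n
    have hfun : ∀ j ∈ PySem.List.pyRange (c + left + midlen) (c + L) 1,
        (if 0 ≤ j ∧ j < n then PySem.List.pyGetD seq j 0 else 0) = 0 := by
      intro j hj; rw [PySem.List.mem_pyRange_one] at hj; rw [if_neg (by omega)]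
    rw [List.map_congr_left hfun, List.map_const', PySem.List.length_pyRange_one]
    congr 1
    omega

-- ===== VERDICT (by name: the statement is the Claim_ definition above) =====
theorem centered_window_spec : Claim_equal_centered_window := by
  intro seq idx W wrap _ hpre
  unfold Spec_centered_window centered_window centered_window_alt
  cases wrap with
  | false =>
    simp only [if_neg Bool.false_ne_true]
    set half := PySem.Int.floordiv W 2 with hhalf
    rw [PySem.List.foldl_append_singleton_eq_map]
    simp only [List.nil_append]
    by_cases hL : 2 * half + 1 ≤ 0
    · rw [if_pos hL, PySem.List.pyRange_one_eq_nil (by omega), List.map_nil]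
    · rw [if_neg hL]
      have h := nonwrap_case seq (idx - half) (2 * half + 1) (by omega)
      rw [show idx - half + (2 * half + 1) = idx + half + 1 by ring] at h ⊢
      rw [h]
  | true =>
    rw [if_pos rfl]
    rw [if_pos rfl]
    cases seq with
    | nil =>
      have hW : W ≤ 0 := hpre rfl rfl
      rw [if_pos hW, PySem.List.pyRange_one_eq_nil (by omega), List.map_nil]
    | cons a l =>
      exact wrap_case (a :: l) (idx - PySem.Int.floordiv W 2) W (by simp)
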